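-- pv_equiv track=rewrite | github.com/scotthallauer/sheepdogai | evaluator/base.py | apportion
-- ===== SOURCE A (Python) =====
-- def apportion(population: list, nb_processes: int):
--   allocation = len(population) // nb_processes
--   overflow = len(population) % nb_processes
--   portions = []
--   total = 0
--   for i in range(nb_processes):
--     portion = population[total : total + allocation]
--     total += allocation
--     if i < overflow:
--       portion.append(population[total])
--       total += 1
--     portions.append(portion)
--   return portions
-- ===== SOURCE B (Python) =====
-- def apportion(population: list, nb_processes: int):
--   portions = []
--   it = iter(population)
--   left = len(population)
--   for k in range(nb_processes, 0, -1):
--     size = -(-left // k)  # ceiling division: this portion's fair share of what is left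
--     portions.append([next(it) for _ in range(size)])
--     left -= size
--   return portions
-- ===== Notes on version B (the rewrite author's own statement) =====
-- stated objective: alternative
-- what changed: Instead of precomputing allocation/overflow and walking a running index with slices over the original list, B repeatedly gives the next portion its fair share by ceiling division over the remaining element count (size = ceil(left/k)) and consumes the list through a single iterator.
import Mathlib
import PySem

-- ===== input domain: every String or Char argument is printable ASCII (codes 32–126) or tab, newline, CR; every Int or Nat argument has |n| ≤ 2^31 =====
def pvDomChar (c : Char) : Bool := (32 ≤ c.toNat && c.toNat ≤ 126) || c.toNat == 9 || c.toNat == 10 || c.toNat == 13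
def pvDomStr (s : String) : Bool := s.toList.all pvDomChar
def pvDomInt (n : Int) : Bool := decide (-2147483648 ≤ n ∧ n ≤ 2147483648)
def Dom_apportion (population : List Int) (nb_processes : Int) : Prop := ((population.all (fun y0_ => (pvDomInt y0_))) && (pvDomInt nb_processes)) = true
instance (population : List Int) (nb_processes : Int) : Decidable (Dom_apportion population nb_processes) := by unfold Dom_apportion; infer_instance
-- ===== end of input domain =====

-- B gives each portion its fair share by ceiling division over the remaining element count and
-- consumes the list through an iterator, instead of A's precomputed allocation/overflow with a
-- running index and slices (objective: alternative).

-- ===== PORT A =====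
def apportion (population : List Int) (nb_processes : Int) : List (List Int) :=
  let allocation := PySem.Int.floordiv (population.length : Int) nb_processes
  let overflow := PySem.Int.mod (population.length : Int) nb_processes
  ((PySem.List.pyRange 0 nb_processes 1).foldl
    (fun (st : List (List Int) × Int) i =>
      let portion := PySem.List.slice population (some st.2) (some (st.2 + allocation))
      let total := st.2 + allocation
      if i < overflow then
        -- population[total]: always in range here (i < overflow ⇒ total < len), so pyGetD is exact
        (st.1 ++ [portion ++ [PySem.List.pyGetD population total 0]], total + 1)
      else
        (st.1 ++ [portion], total))
    ([], 0)).1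

-- ===== PORT B =====
def apportion_alt (population : List Int) (nb_processes : Int) : List (List Int) :=
  -- state: (portions, the unconsumed part of the iterator `it`, left)
  ((PySem.List.pyRange nb_processes 0 (-1)).foldl
    (fun (st : List (List Int) × List Int × Int) k =>
      let size := -(PySem.Int.floordiv (-st.2.2) k)  -- -(-left // k), ceiling division
      -- [next(it) for _ in range(size)]: the next `size` elements of the iterator (size ≤ left always)
      (st.1 ++ [st.2.1.take size.toNat], st.2.1.drop size.toNat, st.2.2 - size))
    ([], population, (population.length : Int))).1

-- ===== PRECONDITION & SPEC =====
-- Pre_ excludes exactly nb_processes = 0, where Python A raises ZeroDivisionError.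
def Pre_apportion (population : List Int) (nb_processes : Int) : Prop := nb_processes ≠ 0
instance (population : List Int) (nb_processes : Int) : Decidable (Pre_apportion population nb_processes) := by unfold Pre_apportion; infer_instance
def pvWitness_apportion : List Int × Int := ([1, 2, 3, 4, 5], 2)

def Spec_apportion (population : List Int) (nb_processes : Int) (out : List (List Int)) : Prop := out = apportion_alt population nb_processes
instance (population : List Int) (nb_processes : Int) (out : List (List Int)) : Decidable (Spec_apportion population nb_processes out) := by unfold Spec_apportion; infer_instance

-- ===== CLAIM (what is proved, stated in full; the proofs are below) =====
def Claim_equal_apportion : Prop := ∀ (population : List Int) (nb_processes : Int), Dom_apportion population nb_processes → Pre_apportion population nb_processes → Spec_apportion population nb_processes (apportion population nb_processes)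

-- ===== LEMMAS AND PROOFS =====

theorem slice_snoc (xs : List Int) (s e : Int) (hs : 0 ≤ s) (hse : s ≤ e)
    (he : e < (xs.length : Int)) (d : Int) :
    PySem.List.slice xs (some s) (some e) ++ [PySem.List.pyGetD xs e d]
      = PySem.List.slice xs (some s) (some (e + 1)) := by
  rw [PySem.List.slice_toNat xs hs (by omega), PySem.List.slice_toNat xs hs (by omega),
      PySem.List.pyGetD_eq_getElem xs d (by omega) he]
  have h1 : (e+1).toNat - s.toNat = (e.toNat - s.toNat) + 1 := by omega
  rw [h1, List.take_add_one, List.getElem?_drop]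
  have h2 : s.toNat + (e.toNat - s.toNat) = e.toNat := by omega
  rw [h2, List.getElem?_eq_getElem (by omega)]
  rfl

-- A's loop equals the closed-form chunk map.
theorem apportion_loop (pop : List Int) (nb : Int) (hnb : 0 < nb) :
    ∀ (a : Int), 0 ≤ a → a ≤ nb → ∀ (acc : List (List Int)),
    (PySem.List.pyRange a nb 1).foldl
      (fun (st : List (List Int) × Int) i =>
        if i < PySem.Int.mod (pop.length : Int) nb then
          (st.1 ++ [PySem.List.slice pop (some st.2)
              (some (st.2 + PySem.Int.floordiv (pop.length : Int) nb)) ++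
              [PySem.List.pyGetD pop (st.2 + PySem.Int.floordiv (pop.length : Int) nb) 0]],
           st.2 + PySem.Int.floordiv (pop.length : Int) nb + 1)
        else
          (st.1 ++ [PySem.List.slice pop (some st.2)
              (some (st.2 + PySem.Int.floordiv (pop.length : Int) nb))],
           st.2 + PySem.Int.floordiv (pop.length : Int) nb))
      (acc, a * PySem.Int.floordiv (pop.length : Int) nb + min a (PySem.Int.mod (pop.length : Int) nb))
    = (acc ++ (PySem.List.pyRange a nb 1).map (fun i =>
        PySem.List.slice pop
          (some (i * PySem.Int.floordiv (pop.length : Int) nb + min i (PySem.Int.mod (pop.length : Int) nb)))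
          (some ((i + 1) * PySem.Int.floordiv (pop.length : Int) nb + min (i + 1) (PySem.Int.mod (pop.length : Int) nb)))),
       nb * PySem.Int.floordiv (pop.length : Int) nb + min nb (PySem.Int.mod (pop.length : Int) nb)) := by
  set alloc := PySem.Int.floordiv (pop.length : Int) nb with halloc
  set ovf := PySem.Int.mod (pop.length : Int) nb with hovf
  have halloc0 : 0 ≤ alloc := by
    rw [halloc, PySem.Int.floordiv_eq_ediv_of_pos hnb]
    exact Int.ediv_nonneg (by positivity) (le_of_lt hnb)
  have hovf0 : 0 ≤ ovf := PySem.Int.mod_nonneg _ hnb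
  have hovflt : ovf < nb := PySem.Int.mod_lt _ hnb
  have hlen : alloc * nb + ovf = (pop.length : Int) := PySem.Int.floordiv_mul_add_mod _ _
  intro a ha hab acc
  induction hn : (nb - a).toNat generalizing a acc with
  | zero =>
    have : a = nb := by omega
    subst this
    rw [PySem.List.pyRange_one_eq_nil (le_refl _)]
    simp
  | succ n ih =>
    have halt : a < nb := by omega
    rw [PySem.List.pyRange_one_cons halt]
    simp only [List.foldl_cons, List.map_cons]
    by_cases hcase : a < ovf
    · rw [if_pos hcase]
      have hmin1 : min a ovf = a := min_eq_left (by omega)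
      have hmin2 : min (a+1) ovf = a+1 := min_eq_left (by omega)
      have hub : alloc * (a+1) ≤ alloc * nb :=
        mul_le_mul_of_nonneg_left (by omega) halloc0
      have hsnoc := slice_snoc pop (a * alloc + min a ovf) (a * alloc + min a ovf + alloc)
        (by rw [hmin1]; nlinarith) (by omega)
        (by rw [hmin1]; nlinarith) 0
      rw [hsnoc]
      have hT : a * alloc + min a ovf + alloc + 1 = (a+1) * alloc + min (a+1) ovf := by
        rw [hmin1, hmin2]; ring
      rw [hT, ih (a+1) (by omega) (by omega) _ (by omega)]
      simp
    · rw [if_neg hcase]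
      have hmin1 : min a ovf = ovf := min_eq_right (by omega)
      have hmin2 : min (a+1) ovf = ovf := min_eq_right (by omega)
      have hT : a * alloc + min a ovf + alloc = (a+1) * alloc + min (a+1) ovf := by
        rw [hmin1, hmin2]; ring
      rw [hT, ih (a+1) (by omega) (by omega) _ (by omega)]
      simp

-- B's iterator-consuming loop equals the same closed-form chunk map.
theorem apportion_alt_loop (pop : List Int) (nb : Int) (hnb : 0 < nb) :
    ∀ (k : Int), 0 ≤ k → k ≤ nb → ∀ (acc : List (List Int)),
    (PySem.List.pyRange k 0 (-1)).foldl
      (fun (st : List (List Int) × List Int × Int) j =>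
        (st.1 ++ [st.2.1.take (-(PySem.Int.floordiv (-st.2.2) j)).toNat],
         st.2.1.drop (-(PySem.Int.floordiv (-st.2.2) j)).toNat,
         st.2.2 - -(PySem.Int.floordiv (-st.2.2) j)))
      (acc, pop.drop ((nb - k) * PySem.Int.floordiv (pop.length : Int) nb
                       + min (nb - k) (PySem.Int.mod (pop.length : Int) nb)).toNat,
            (pop.length : Int) - ((nb - k) * PySem.Int.floordiv (pop.length : Int) nb
                       + min (nb - k) (PySem.Int.mod (pop.length : Int) nb)))
    = (acc ++ (PySem.List.pyRange (nb - k) nb 1).map (fun i =>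
        PySem.List.slice pop
          (some (i * PySem.Int.floordiv (pop.length : Int) nb + min i (PySem.Int.mod (pop.length : Int) nb)))
          (some ((i + 1) * PySem.Int.floordiv (pop.length : Int) nb + min (i + 1) (PySem.Int.mod (pop.length : Int) nb)))),
       pop.drop (nb * PySem.Int.floordiv (pop.length : Int) nb
                  + min nb (PySem.Int.mod (pop.length : Int) nb)).toNat,
       (pop.length : Int) - (nb * PySem.Int.floordiv (pop.length : Int) nb
                  + min nb (PySem.Int.mod (pop.length : Int) nb))) := by
  set alloc := PySem.Int.floordiv (pop.length : Int) nb with halloc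
  set ovf := PySem.Int.mod (pop.length : Int) nb with hovf
  have halloc0 : 0 ≤ alloc := by
    rw [halloc, PySem.Int.floordiv_eq_ediv_of_pos hnb]
    exact Int.ediv_nonneg (by positivity) (le_of_lt hnb)
  have hovf0 : 0 ≤ ovf := PySem.Int.mod_nonneg _ hnb
  have hovflt : ovf < nb := PySem.Int.mod_lt _ hnb
  have hlen : alloc * nb + ovf = (pop.length : Int) := PySem.Int.floordiv_mul_add_mod _ _
  intro k hk0 hknb acc
  induction hn : k.toNat generalizing k acc with
  | zero =>
    have : k = 0 := by omega
    subst this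
    rw [PySem.List.pyRange_neg_one_eq_nil le_rfl, PySem.List.pyRange_one_eq_nil (by omega)]
    simp
  | succ n ih =>
    have hkpos : 0 < k := by omega
    rw [PySem.List.pyRange_neg_one_cons hkpos]
    simp only [List.foldl_cons]
    set i := nb - k with hi
    have hi0 : 0 ≤ i := by omega
    have hilt : i < nb := by omega
    set Ti := i * alloc + min i ovf with hTi
    have hTi0 : 0 ≤ Ti := by
      have : 0 ≤ i * alloc := mul_nonneg hi0 halloc0
      have : 0 ≤ min i ovf := le_min hi0 hovf0
      omega
    have hTile : Ti ≤ (pop.length : Int) := by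
      have h1 : i * alloc ≤ nb * alloc := mul_le_mul_of_nonneg_right (by omega) halloc0
      have h2 : min i ovf ≤ ovf := min_le_right _ _
      nlinarith
    -- the computed ceiling size
    set q : Int := alloc + (if i < ovf then 1 else 0) with hq
    have hq0 : 0 ≤ q := by rw [hq]; split_ifs <;> omega
    have hsize : -(PySem.Int.floordiv (-((pop.length : Int) - Ti)) k) = q := by
      rw [PySem.Int.neg_floordiv_neg_eq_iff_of_pos hkpos]
      by_cases hc : i < ovf
      · have hmin : min i ovf = i := min_eq_left (by omega)
        rw [hq, if_pos hc] at *
        constructor <;> nlinarith [hmin, hlen, hTi]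
      · have hmin : min i ovf = ovf := min_eq_right (by omega)
        rw [hq, if_neg hc] at *
        constructor <;> nlinarith [hmin, hlen, hTi]
    have hTsucc : Ti + q = (i + 1) * alloc + min (i + 1) ovf := by
      rw [hTi, hq]
      by_cases hc : i < ovf
      · rw [if_pos hc, min_eq_left (by omega), min_eq_left (by omega)]; ring
      · rw [if_neg hc, min_eq_right (by omega), min_eq_right (by omega)]; ring
    rw [hsize]
    -- the chunk taken from the iterator equals the closed-form slice of pop
    have hchunk : (pop.drop Ti.toNat).take q.toNat
        = PySem.List.slice pop (some Ti) (some (Ti + q)) := by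
      rw [PySem.List.slice_toNat pop hTi0 (by omega)]
      congr 1
      omega
    -- the unconsumed rest of the iterator is the next suffix
    have hrem : (pop.drop Ti.toNat).drop q.toNat
        = pop.drop ((nb - (k - 1)) * alloc + min (nb - (k - 1)) ovf).toNat := by
      rw [List.drop_drop]
      congr 1
      have : nb - (k - 1) = i + 1 := by omega
      rw [this, ← hTsucc]
      omega
    have hleft : (pop.length : Int) - Ti - q
        = (pop.length : Int) - ((nb - (k - 1)) * alloc + min (nb - (k - 1)) ovf) := by
      have : nb - (k - 1) = i + 1 := by omega
      rw [this, ← hTsucc]; ring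
    rw [hchunk, hrem, hleft, ih (k - 1) (by omega) (by omega) _ (by omega)]
    have hrange : PySem.List.pyRange i nb 1 = i :: PySem.List.pyRange (i + 1) nb 1 :=
      PySem.List.pyRange_one_cons hilt
    have : nb - (k - 1) = i + 1 := by omega
    rw [this, hrange]
    simp [← hTsucc, hTi]

-- ===== VERDICT (by name: the statement is the Claim_ definition above) =====
theorem apportion_spec : Claim_equal_apportion := by
  intro pop nb hdom hpre
  simp only [Spec_apportion, apportion, apportion_alt]
  by_cases hnb : 0 < nb
  · have keyA := apportion_loop pop nb hnb 0 le_rfl (le_of_lt hnb) []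
    rw [zero_mul, zero_add, min_eq_left (PySem.Int.mod_nonneg _ hnb), List.nil_append] at keyA
    have keyB := apportion_alt_loop pop nb hnb nb (le_of_lt hnb) le_rfl []
    rw [sub_self, zero_mul, zero_add, min_eq_left (PySem.Int.mod_nonneg _ hnb)] at keyB
    simp only [Int.toNat_zero, List.drop_zero, List.nil_append, sub_zero] at keyB
    rw [keyA, keyB]
  · rw [PySem.List.pyRange_one_eq_nil (by omega), PySem.List.pyRange_neg_one_eq_nil (by omega)]
    simp
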